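-- pv_equiv track=rewrite | github.com/mukhtarovn/python_algorithms | less_4/task_1_1.py | min_numb_3
-- ===== SOURCE A (Python) =====
-- def min_numb_3(n):
--     arr = []
--     for i in n:
--         if i < 0:
--             arr.append(i)
--     m = max(arr)
--     pos = None
--     for j in enumerate(n):
--         if j[1] == m:
--             pos = j[0]
--             break
--     return f'позиция {pos + 1}, число {m}'
-- ===== SOURCE B (Python) =====
-- def min_numb_3(n):
--     m = pos = None
--     for idx, v in enumerate(n):
--         if v < 0 and (m is None or v > m):
--             m, pos = v, idx
--     if m is None:
--         raise ValueError('list contains no negative numbers')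
--     return f'позиция {pos + 1}, число {m}'
-- ===== Notes on version B (the rewrite author's own statement) =====
-- stated objective: simpler
-- what changed: Replaced A's three passes (collect negatives, max(), index-search loop) by a single enumerate pass keeping the best negative and its first index; Pre_ excludes inputs with no negative element, on which A's max([]) raises ValueError (B raises ValueError with its own message there).
-- outside the precondition, e.g. on min_numb_3([]): A raises ValueError, B raises ValueError
import Mathlib
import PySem

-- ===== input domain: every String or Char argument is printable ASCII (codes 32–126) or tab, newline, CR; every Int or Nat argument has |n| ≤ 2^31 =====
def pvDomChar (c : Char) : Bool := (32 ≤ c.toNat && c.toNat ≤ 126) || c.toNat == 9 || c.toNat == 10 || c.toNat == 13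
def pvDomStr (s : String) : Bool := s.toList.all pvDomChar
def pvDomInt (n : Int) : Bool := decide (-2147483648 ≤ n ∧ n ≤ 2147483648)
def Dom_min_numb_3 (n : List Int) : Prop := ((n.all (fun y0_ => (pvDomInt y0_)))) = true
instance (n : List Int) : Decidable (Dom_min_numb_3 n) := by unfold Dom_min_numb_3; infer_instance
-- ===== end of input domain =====

-- B replaces A's three passes (collect negatives, max(), index-search) by one enumerate
-- pass keeping the best negative and its first index; same return value on Pre_.

-- ===== PORT A =====
-- first index loop: 'for j in enumerate(n): if j[1] == m: pos = j[0]; break'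
def pvAFind (l : List (Int × Int)) (m : Int) : Option Int :=
  match l with
  | [] => none
  | j :: t => if j.2 == m then some j.1 else pvAFind t m

def min_numb_3 (n : List Int) : String :=
  -- arr = the negatives collected by the append loop (inlined local)
  match PySem.List.max? (n.foldl (fun acc i => if i < 0 then acc ++ [i] else acc) []) (fun x => x) with
  | none => ""  -- Python: max([]) raises ValueError; excluded by Pre_
  | some m =>
    match pvAFind (PySem.List.enumerate n 0) m with
    | none => ""  -- unreachable: m ∈ n
    | some pos => "позиция " ++ PySem.Int.toStr (pos + 1) ++ ", число " ++ PySem.Int.toStr m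

-- ===== PORT B =====
-- 'if v < 0 and (m is None or v > m): m, pos = v, idx'
def pvBStep (st : Option (Int × Int)) (p : Int × Int) : Option (Int × Int) :=
  match st with
  | none => if p.2 < 0 then some (p.2, p.1) else none
  | some (m, pos) => if p.2 < 0 ∧ m < p.2 then some (p.2, p.1) else some (m, pos)

def min_numb_3_alt (n : List Int) : String :=
  match (PySem.List.enumerate n 0).foldl pvBStep none with
  | none => ""  -- Python: raises ValueError; excluded by Pre_
  | some (m, pos) => "позиция " ++ PySem.Int.toStr (pos + 1) ++ ", число " ++ PySem.Int.toStr m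

-- ===== PRECONDITION & SPEC =====
-- Pre_ excludes inputs with no negative element, on which A's max([]) raises ValueError (B raises too).
def Pre_min_numb_3 (n : List Int) : Prop := ∃ i ∈ n, i < 0
instance (n : List Int) : Decidable (Pre_min_numb_3 n) := by unfold Pre_min_numb_3; infer_instance
def pvWitness_min_numb_3 : List Int := [3, -5, 2, -1]

def Spec_min_numb_3 (n : List Int) (out : String) : Prop := out = min_numb_3_alt n
instance (n : List Int) (out : String) : Decidable (Spec_min_numb_3 n out) := by unfold Spec_min_numb_3; infer_instance

-- ===== CLAIM (what is proved, stated in full; the proofs are below) =====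
def Claim_equal_min_numb_3 : Prop := ∀ (n : List Int), Dom_min_numb_3 n → Pre_min_numb_3 n → Spec_min_numb_3 n (min_numb_3 n)

-- ===== LEMMAS AND PROOFS =====

-- merge semantics of B's fold started from a non-empty state
def pvCombine (s : Int × Int) (r : Option (Int × Int)) : Option (Int × Int) :=
  match r with
  | none => some s
  | some t => if s.1 < t.1 then some t else some s

theorem pvBfold_some (l : List (Int × Int)) (s : Int × Int) :
    l.foldl pvBStep (some s) = pvCombine s (l.foldl pvBStep none) := by
  induction l generalizing s with
  | nil => rfl
  | cons q t ih =>
    obtain ⟨m, p⟩ := s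
    simp only [List.foldl_cons, pvBStep]
    by_cases hq : q.2 < 0
    · by_cases hlt : m < q.2
      · rw [if_pos ⟨hq, hlt⟩, if_pos hq, ih]
        cases hr : t.foldl pvBStep none with
        | none => simp [pvCombine, hlt]
        | some r =>
          simp only [pvCombine]
          split_ifs <;> simp_all <;> omega
      · rw [if_neg (by tauto), if_pos hq, ih]
        rw [ih (q.2, q.1)]
        cases hr : t.foldl pvBStep none with
        | none => simp [pvCombine, hlt]
        | some r =>
          simp only [pvCombine]
          split_ifs <;> simp_all <;> omega
    · rw [if_neg (by tauto), if_neg hq, ih]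

theorem pvAFind_mem (t : List Int) (s m : Int) (hm : m ∈ t) :
    ∃ p, pvAFind (PySem.List.enumerate t s) m = some p := by
  induction t generalizing s with
  | nil => cases hm
  | cons x r ih =>
    rw [PySem.List.enumerate_cons]
    simp only [pvAFind]
    by_cases hx : x = m
    · exact ⟨s, by rw [if_pos (by simpa using hx)]⟩
    · rw [if_neg (by simpa using hx)]
      cases hm with
      | head => exact absurd rfl hx
      | tail _ h => exact ih (s + 1) h

theorem pvFoldlMaxMax (l : List Int) (a b : Int) :
    l.foldl max (max a b) = max a (l.foldl max b) := by
  induction l generalizing b with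
  | nil => rfl
  | cons x t ih =>
    simp only [List.foldl_cons]
    rw [max_assoc, ih]

theorem pvMain (t : List Int) (s : Int) :
    (PySem.List.enumerate t s).foldl pvBStep none =
      match PySem.List.max? (t.filter (fun i => decide (i < 0))) (fun x => x) with
      | none => none
      | some m =>
        match pvAFind (PySem.List.enumerate t s) m with
        | none => none
        | some p => some (m, p) := by
  induction t generalizing s with
  | nil => rfl
  | cons x r ih =>
    rw [PySem.List.enumerate_cons]
    simp only [List.foldl_cons]
    by_cases hx : x < 0
    · -- negative head
      have hf : (x :: r).filter (fun i => decide (i < 0)) = x :: r.filter (fun i => decide (i < 0)) := by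
        simp [hx]
      rw [hf, PySem.List.max?_id_cons]
      have hstep : pvBStep none (s, x) = some (x, s) := by simp [pvBStep, hx]
      rw [hstep, pvBfold_some, ih (s + 1)]
      cases hM : PySem.List.max? (r.filter (fun i => decide (i < 0))) (fun x => x) with
      | none =>
        have hnil : r.filter (fun i => decide (i < 0)) = [] :=
          (PySem.List.max?_eq_none_iff _ _).mp hM
        rw [hnil]
        simp [pvCombine, pvAFind]
      | some m' =>
        have hm'memf : m' ∈ r.filter (fun i => decide (i < 0)) := PySem.List.max?_mem hM
        have hm'mem : m' ∈ r := List.mem_of_mem_filter hm'memf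
        obtain ⟨p', hp'⟩ := pvAFind_mem r (s + 1) m' hm'mem
        have hfm : (r.filter (fun i => decide (i < 0))).foldl max x = max x m' := by
          obtain ⟨y, rest, hyr⟩ : ∃ y rest, r.filter (fun i => decide (i < 0)) = y :: rest := by
            cases hc : r.filter (fun i => decide (i < 0)) with
            | nil => rw [hc] at hm'memf; cases hm'memf
            | cons y rest => exact ⟨y, rest, rfl⟩
          have hys : PySem.List.max? (y :: rest) (fun x => x) = some m' := hyr ▸ hM
          rw [PySem.List.max?_id_cons] at hys
          have hym : rest.foldl max y = m' := by injection hys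
          rw [hyr, List.foldl_cons, pvFoldlMaxMax, hym]
        rw [hfm]
        dsimp only
        rw [hp']
        dsimp only
        simp only [pvCombine, pvAFind]
        by_cases hlt : x < m'
        · rw [if_pos hlt, max_eq_right (le_of_lt hlt), if_neg (by simp; omega), hp']
        · rw [if_neg hlt, max_eq_left (by omega), if_pos (by simp)]
    · -- nonnegative head
      have hf : (x :: r).filter (fun i => decide (i < 0)) = r.filter (fun i => decide (i < 0)) := by
        simp [hx]
      have hstep : pvBStep none (s, x) = none := by simp [pvBStep, hx]
      rw [hf, hstep, ih (s + 1)]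
      cases hM : PySem.List.max? (r.filter (fun i => decide (i < 0))) (fun x => x) with
      | none => rfl
      | some m' =>
        have hm'neg : m' < 0 := by
          have h1 := List.of_mem_filter (PySem.List.max?_mem hM); simpa using h1
        dsimp only
        simp only [pvAFind]
        rw [if_neg (by simp; omega)]

-- ===== VERDICT (by name: the statement is the Claim_ definition above) =====
theorem min_numb_3_spec : Claim_equal_min_numb_3 := by
  intro n _ hpre
  unfold Spec_min_numb_3 min_numb_3 min_numb_3_alt
  rw [PySem.List.foldl_append_ite_eq_filter, List.nil_append, pvMain n 0]
  obtain ⟨i, hi, hineg⟩ := hpre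
  have hif : i ∈ n.filter (fun i => decide (i < 0)) := List.mem_filter.mpr ⟨hi, by simpa⟩
  cases hM : PySem.List.max? (n.filter (fun i => decide (i < 0))) (fun x => x) with
  | none => simp [(PySem.List.max?_eq_none_iff _ _).mp hM] at hif
  | some m =>
    obtain ⟨p, hp⟩ := pvAFind_mem n 0 m (List.mem_of_mem_filter (PySem.List.max?_mem hM))
    dsimp only
    rw [hp]
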